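-- pv_equiv track=rewrite | github.com/orewa-arun/flashcards-frontend | backend/app/content_generation/builders/topic_brief_builder.py | _generate_relationships
-- ===== SOURCE A (Python) =====
-- from typing import Dict, Any, List, Optional
--
-- def _generate_relationships(
--
--     definitions: List[Dict[str, str]],
--     key_concepts: List[str]
-- ) -> List[str]:
--     """
--     Generate concept relationships to help prevent common mistakes.
--
--     These highlight distinctions between similar concepts.
--     """
--     relationships = []
--
--     # Find similar terms in definitions
--     terms = [d.get("term", "").lower() for d in definitions]
--
--     # Look for related terms that might be confused
--     confusion_pairs = [
--         ("pre-purchase", "post-purchase"),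
--         ("brand-owned", "customer-owned"),
--         ("brand-owned", "partner-owned"),
--         ("partner-owned", "customer-owned"),
--         ("awareness", "consideration"),
--         ("familiarity", "loyalty"),
--         ("touchpoint", "channel"),
--         ("persona", "segment"),
--         ("buyer", "shopper"),
--         ("purchase", "consumption"),
--     ]
--
--     for term1, term2 in confusion_pairs:
--         term1_found = any(term1 in t for t in terms) or any(term1 in c.lower() for c in key_concepts)
--         term2_found = any(term2 in t for t in terms) or any(term2 in c.lower() for c in key_concepts)
--
--         if term1_found and term2_found:
--             relationships.append(
--                 f"'{term1.title()}' vs '{term2.title()}' - Don't confuse these related but distinct concepts"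
--             )
--
--     # Add generic relationship for stages if found
--     if any("stage" in t for t in terms):
--         relationships.append(
--             "The stages are sequential - understand the order and what happens at each"
--         )
--
--     return relationships[:5]
-- ===== SOURCE B (Python) =====
-- def _generate_relationships(definitions, key_concepts):
--     """Single-pass variant: scan every text once, collecting which search
--     patterns occur into a `found` set, then filter the fixed pair table."""
--     confusion_pairs = [
--         ("pre-purchase", "post-purchase"),
--         ("brand-owned", "customer-owned"),
--         ("brand-owned", "partner-owned"),
--         ("partner-owned", "customer-owned"),
--         ("awareness", "consideration"),
--         ("familiarity", "loyalty"),
--         ("touchpoint", "channel"),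
--         ("persona", "segment"),
--         ("buyer", "shopper"),
--         ("purchase", "consumption"),
--     ]
--     patterns = [
--         "pre-purchase", "post-purchase", "brand-owned", "customer-owned",
--         "partner-owned", "awareness", "consideration", "familiarity",
--         "loyalty", "touchpoint", "channel", "persona", "segment",
--         "buyer", "shopper", "purchase", "consumption",
--     ]
--     found = set()
--     for d in definitions:
--         t = d.get("term", "").lower()
--         for p in patterns + ["stage"]:   # "stage" counts only in terms
--             if p in t:
--                 found.add(p)
--     for c in key_concepts:
--         cl = c.lower()
--         for p in patterns:
--             if p in cl:
--                 found.add(p)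
--     relationships = [
--         f"'{a.title()}' vs '{b.title()}' - Don't confuse these related but distinct concepts"
--         for a, b in confusion_pairs if a in found and b in found
--     ]
--     if "stage" in found:
--         relationships.append(
--             "The stages are sequential - understand the order and what happens at each"
--         )
--     return relationships[:5]
-- ===== Notes on version B (the rewrite author's own statement) =====
-- stated objective: faster
-- what changed: Instead of re-scanning all terms/key-concepts (and re-lowering the concepts) for each of the 10 confusion pairs, B makes one pass over the texts collecting the occurring search patterns into a found-set, then filters the fixed pair table by set membership.
import Mathlib
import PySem

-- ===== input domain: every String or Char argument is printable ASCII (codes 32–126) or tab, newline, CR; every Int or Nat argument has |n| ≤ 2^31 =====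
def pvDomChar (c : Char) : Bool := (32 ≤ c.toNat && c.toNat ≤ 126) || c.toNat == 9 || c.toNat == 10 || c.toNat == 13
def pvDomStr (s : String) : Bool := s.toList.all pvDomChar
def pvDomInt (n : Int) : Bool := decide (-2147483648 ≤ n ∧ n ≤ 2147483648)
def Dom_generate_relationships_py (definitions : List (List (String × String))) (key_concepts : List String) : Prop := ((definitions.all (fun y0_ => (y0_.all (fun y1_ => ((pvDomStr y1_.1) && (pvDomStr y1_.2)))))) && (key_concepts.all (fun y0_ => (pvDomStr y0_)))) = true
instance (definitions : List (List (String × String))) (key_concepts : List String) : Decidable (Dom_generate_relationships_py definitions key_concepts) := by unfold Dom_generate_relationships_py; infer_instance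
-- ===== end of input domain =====

-- B replaces A's per-pair rescans of all texts by one pass over the texts that
-- collects the occurring search patterns into a set, then filters the pair table.

-- hand port of Python str.title (PySem has none): a letter after a non-letter is
-- uppercased, other letters lowercased; exact on the ASCII domain, where Python's
-- "cased" characters are exactly the letters.
def pyTitleChars : List Char → Bool → List Char
  | [], _ => []
  | c :: rest, prevCased =>
    if PySem.Chars.isalpha c then
      (if prevCased then PySem.Chars.lowerChar c else PySem.Chars.upperChar c) :: pyTitleChars rest true
    else
      c :: pyTitleChars rest false

def pyTitle (s : String) : String := String.ofList (pyTitleChars s.toList false)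

-- ===== PORT A =====
def generate_relationships_py (definitions : List (List (String × String))) (key_concepts : List String) : List String :=
  let relationships : List String := []
  let terms := definitions.map (fun d => PySem.Str.lower (PySem.Dict.getD (PySem.Dict.mk d) "term" ""))
  let confusion_pairs : List (String × String) := [
    ("pre-purchase", "post-purchase"),
    ("brand-owned", "customer-owned"),
    ("brand-owned", "partner-owned"),
    ("partner-owned", "customer-owned"),
    ("awareness", "consideration"),
    ("familiarity", "loyalty"),
    ("touchpoint", "channel"),
    ("persona", "segment"),
    ("buyer", "shopper"),
    ("purchase", "consumption")]
  let relationships := confusion_pairs.foldl (fun rels tp =>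
    let term1 := tp.1
    let term2 := tp.2
    let term1_found := terms.any (fun t => PySem.Str.isIn term1 t) || key_concepts.any (fun c => PySem.Str.isIn term1 (PySem.Str.lower c))
    let term2_found := terms.any (fun t => PySem.Str.isIn term2 t) || key_concepts.any (fun c => PySem.Str.isIn term2 (PySem.Str.lower c))
    if term1_found && term2_found then
      rels ++ ["'" ++ pyTitle term1 ++ "' vs '" ++ pyTitle term2 ++ "' - Don't confuse these related but distinct concepts"]
    else rels) relationships
  let relationships := if terms.any (fun t => PySem.Str.isIn "stage" t) then
      relationships ++ ["The stages are sequential - understand the order and what happens at each"]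
    else relationships
  PySem.List.slice relationships none (some 5)

-- ===== PORT B =====
def pvPatterns : List String := [
  "pre-purchase", "post-purchase", "brand-owned", "customer-owned",
  "partner-owned", "awareness", "consideration", "familiarity",
  "loyalty", "touchpoint", "channel", "persona", "segment",
  "buyer", "shopper", "purchase", "consumption"]

def pvTermText (d : List (String × String)) : String :=
  PySem.Str.lower (PySem.Dict.getD (PySem.Dict.mk d) "term" "")

-- the inner 'for p in pats: if p in t: found.add(p)' loop
def pvScan (pats : List String) (t : String) (s : PySem.Set String) : PySem.Set String :=
  pats.foldl (fun s p => if PySem.Str.isIn p t then PySem.Set.add s p else s) s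

-- found-set built in one pass over the texts
def pvFound (definitions : List (List (String × String))) (key_concepts : List String) : PySem.Set String :=
  let f1 := definitions.foldl (fun s d => pvScan (pvPatterns ++ ["stage"]) (pvTermText d) s) PySem.Set.empty
  key_concepts.foldl (fun s c => pvScan pvPatterns (PySem.Str.lower c) s) f1

def generate_relationships_py_alt (definitions : List (List (String × String))) (key_concepts : List String) : List String :=
  let confusion_pairs : List (String × String) := [
    ("pre-purchase", "post-purchase"),
    ("brand-owned", "customer-owned"),
    ("brand-owned", "partner-owned"),
    ("partner-owned", "customer-owned"),
    ("awareness", "consideration"),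
    ("familiarity", "loyalty"),
    ("touchpoint", "channel"),
    ("persona", "segment"),
    ("buyer", "shopper"),
    ("purchase", "consumption")]
  let found : PySem.Set String := pvFound definitions key_concepts
  let relationships :=
    (confusion_pairs.filter (fun ab => PySem.Set.contains found ab.1 && PySem.Set.contains found ab.2)).map
      (fun ab => "'" ++ pyTitle ab.1 ++ "' vs '" ++ pyTitle ab.2 ++ "' - Don't confuse these related but distinct concepts")
  let relationships := if PySem.Set.contains found "stage" then
      relationships ++ ["The stages are sequential - understand the order and what happens at each"]
    else relationships
  PySem.List.slice relationships none (some 5)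

-- ===== PRECONDITION & SPEC =====
def Spec_generate_relationships_py (definitions : List (List (String × String))) (key_concepts : List String) (out : List String) : Prop := out = generate_relationships_py_alt definitions key_concepts
instance (definitions : List (List (String × String))) (key_concepts : List String) (out : List String) : Decidable (Spec_generate_relationships_py definitions key_concepts out) := by unfold Spec_generate_relationships_py; infer_instance

-- ===== CLAIM (what is proved, stated in full; the proofs are below) =====
def Claim_equal_generate_relationships_py : Prop := ∀ (definitions : List (List (String × String))) (key_concepts : List String), Dom_generate_relationships_py definitions key_concepts → Spec_generate_relationships_py definitions key_concepts (generate_relationships_py definitions key_concepts)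

-- ===== LEMMAS AND PROOFS =====

lemma mem_pvScan (pats : List String) (t : String) (s : PySem.Set String) (x : String) :
    x ∈ pvScan pats t s ↔ x ∈ s ∨ (x ∈ pats ∧ PySem.Str.isIn x t = true) := by
  induction pats generalizing s with
  | nil => simp [pvScan]
  | cons p ps ih =>
    simp only [pvScan, List.foldl_cons] at ih ⊢
    rw [ih]
    by_cases h : PySem.Str.isIn p t = true
    · rw [if_pos h]
      rw [PySem.Set.mem_add]
      constructor
      · rintro ((hs | hxp) | ⟨hp, hin⟩)
        · exact Or.inl hs
        · subst hxp; exact Or.inr ⟨List.mem_cons_self, h⟩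
        · exact Or.inr ⟨List.mem_cons_of_mem _ hp, hin⟩
      · rintro (hs | ⟨hp, hin⟩)
        · exact Or.inl (Or.inl hs)
        · rcases List.mem_cons.mp hp with hxp | hp
          · exact Or.inl (Or.inr hxp)
          · exact Or.inr ⟨hp, hin⟩
    · rw [if_neg h]
      constructor
      · rintro (hs | ⟨hp, hin⟩)
        · exact Or.inl hs
        · exact Or.inr ⟨List.mem_cons_of_mem _ hp, hin⟩
      · rintro (hs | ⟨hp, hin⟩)
        · exact Or.inl hs
        · rcases List.mem_cons.mp hp with hxp | hp
          · subst hxp; exact absurd hin h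
          · exact Or.inr ⟨hp, hin⟩

lemma mem_foldl_pvScan {α : Type} (f : α → String) (pats : List String) (l : List α)
    (s : PySem.Set String) (x : String) :
    x ∈ l.foldl (fun s a => pvScan pats (f a) s) s ↔
      x ∈ s ∨ (x ∈ pats ∧ ∃ a ∈ l, PySem.Str.isIn x (f a) = true) := by
  induction l generalizing s with
  | nil => simp
  | cons a as ih =>
    simp only [List.foldl_cons]
    rw [ih, mem_pvScan]
    constructor
    · rintro ((hs | ⟨hp, hin⟩) | ⟨hp, b, hb, hin⟩)
      · exact Or.inl hs
      · exact Or.inr ⟨hp, a, List.mem_cons_self, hin⟩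
      · exact Or.inr ⟨hp, b, List.mem_cons_of_mem _ hb, hin⟩
    · rintro (hs | ⟨hp, b, hb, hin⟩)
      · exact Or.inl (Or.inl hs)
      · rcases List.mem_cons.mp hb with rfl | hb
        · exact Or.inl (Or.inr ⟨hp, hin⟩)
        · exact Or.inr ⟨hp, b, hb, hin⟩

lemma mem_pvFound (definitions : List (List (String × String))) (key_concepts : List String) (x : String) :
    x ∈ pvFound definitions key_concepts ↔
      (x ∈ pvPatterns ++ ["stage"] ∧ ∃ d ∈ definitions, PySem.Str.isIn x (pvTermText d) = true)
      ∨ (x ∈ pvPatterns ∧ ∃ c ∈ key_concepts, PySem.Str.isIn x (PySem.Str.lower c) = true) := by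
  unfold pvFound
  rw [mem_foldl_pvScan (fun c => PySem.Str.lower c), mem_foldl_pvScan pvTermText]
  simp only [PySem.Set.empty, List.not_mem_nil, false_or]

-- membership in B's found-set, as the booleans A computes
lemma contains_found_eq (definitions : List (List (String × String))) (key_concepts : List String)
    (x : String) (hx : x ∈ pvPatterns) :
    PySem.Set.contains (pvFound definitions key_concepts) x
    = ((definitions.map pvTermText).any (fun t => PySem.Str.isIn x t)
        || key_concepts.any (fun c => PySem.Str.isIn x (PySem.Str.lower c))) := by
  rw [Bool.eq_iff_iff, PySem.Set.contains_iff, mem_pvFound]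
  simp only [Bool.or_eq_true, List.any_eq_true, List.mem_map, List.mem_append, hx, true_or,
    true_and]
  constructor
  · rintro (⟨d, hd, hin⟩ | ⟨c, hc, hin⟩)
    · exact Or.inl ⟨_, ⟨d, hd, rfl⟩, hin⟩
    · exact Or.inr ⟨c, hc, hin⟩
  · rintro (⟨t, ⟨d, hd, rfl⟩, hin⟩ | ⟨c, hc, hin⟩)
    · exact Or.inl ⟨d, hd, hin⟩
    · exact Or.inr ⟨c, hc, hin⟩

lemma contains_found_stage (definitions : List (List (String × String))) (key_concepts : List String) :
    PySem.Set.contains (pvFound definitions key_concepts) "stage"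
    = (definitions.map pvTermText).any (fun t => PySem.Str.isIn "stage" t) := by
  rw [Bool.eq_iff_iff, PySem.Set.contains_iff, mem_pvFound]
  have hstage : ("stage" : String) ∉ pvPatterns := by decide
  simp only [hstage, false_and, or_false, List.any_eq_true, List.mem_map, List.mem_append,
    List.mem_singleton, or_true, true_and]
  constructor
  · rintro ⟨d, hd, hin⟩
    exact ⟨_, ⟨d, hd, rfl⟩, hin⟩
  · rintro ⟨t, ⟨d, hd, rfl⟩, hin⟩
    exact ⟨d, hd, hin⟩

theorem generate_relationships_py_spec_aux (definitions : List (List (String × String))) (key_concepts : List String) :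
    generate_relationships_py definitions key_concepts = generate_relationships_py_alt definitions key_concepts := by
  unfold generate_relationships_py generate_relationships_py_alt
  simp only []
  rw [PySem.List.foldl_append_if
    (p := fun tp : String × String =>
      ((definitions.map (fun d => PySem.Str.lower (PySem.Dict.getD (PySem.Dict.mk d) "term" ""))).any (fun t => PySem.Str.isIn tp.1 t)
        || key_concepts.any (fun c => PySem.Str.isIn tp.1 (PySem.Str.lower c)))
      && ((definitions.map (fun d => PySem.Str.lower (PySem.Dict.getD (PySem.Dict.mk d) "term" ""))).any (fun t => PySem.Str.isIn tp.2 t)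
        || key_concepts.any (fun c => PySem.Str.isIn tp.2 (PySem.Str.lower c))))
    (f := fun tp : String × String =>
      "'" ++ pyTitle tp.1 ++ "' vs '" ++ pyTitle tp.2 ++ "' - Don't confuse these related but distinct concepts")]
  have hterm : (fun d => PySem.Str.lower (PySem.Dict.getD (PySem.Dict.mk d) "term" "")) = pvTermText := rfl
  rw [hterm, List.nil_append]
  have hf : List.filter
      (fun ab : String × String =>
        PySem.Set.contains (pvFound definitions key_concepts) ab.1
          && PySem.Set.contains (pvFound definitions key_concepts) ab.2)
      [("pre-purchase", "post-purchase"), ("brand-owned", "customer-owned"), ("brand-owned", "partner-owned"),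
        ("partner-owned", "customer-owned"), ("awareness", "consideration"), ("familiarity", "loyalty"),
        ("touchpoint", "channel"), ("persona", "segment"), ("buyer", "shopper"), ("purchase", "consumption")]
    = List.filter
      (fun tp : String × String =>
        ((definitions.map pvTermText).any (fun t => PySem.Str.isIn tp.1 t)
          || key_concepts.any (fun c => PySem.Str.isIn tp.1 (PySem.Str.lower c)))
        && ((definitions.map pvTermText).any (fun t => PySem.Str.isIn tp.2 t)
          || key_concepts.any (fun c => PySem.Str.isIn tp.2 (PySem.Str.lower c))))
      [("pre-purchase", "post-purchase"), ("brand-owned", "customer-owned"), ("brand-owned", "partner-owned"),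
        ("partner-owned", "customer-owned"), ("awareness", "consideration"), ("familiarity", "loyalty"),
        ("touchpoint", "channel"), ("persona", "segment"), ("buyer", "shopper"), ("purchase", "consumption")] := by
    apply List.filter_congr
    intro ab hab
    have h1 : ab.1 ∈ pvPatterns := by fin_cases hab <;> decide
    have h2 : ab.2 ∈ pvPatterns := by fin_cases hab <;> decide
    rw [contains_found_eq definitions key_concepts ab.1 h1,
        contains_found_eq definitions key_concepts ab.2 h2]
  rw [contains_found_stage, hf]

-- ===== VERDICT (by name: the statement is the Claim_ definition above) =====
theorem generate_relationships_py_spec : Claim_equal_generate_relationships_py := by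
  intro definitions key_concepts _
  exact generate_relationships_py_spec_aux definitions key_concepts
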